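-- pv_equiv track=rewrite | github.com/louis-cl/advent-of-code | 2025/day6/part2.py | solve
-- ===== SOURCE A (Python) =====
-- import math
--
-- def solve(lines):
--     ops = lines[-1].split()
--     i = 0
--     nums = []
--     total = 0
--     for l in zip(*lines[:-1]):
--         val = "".join(l).strip()
--         if val:
--             nums.append(int(val))
--         else: # space column
--             if ops[i] == '+':
--                 total += sum(nums)
--             else:
--                 total += math.prod(nums)
--             nums = []
--             i += 1
--     return total
-- ===== SOURCE B (Python) =====
-- import math
--
-- def solve(lines):
--     ops = lines[-1].split()
--     cols = ["".join(t).strip() for t in zip(*lines[:-1])]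
--     total = 0
--     i = 0
--     while "" in cols:
--         j = cols.index("")
--         seg = [int(c) for c in cols[:j]]
--         total += sum(seg) if ops[i] == "+" else math.prod(seg)
--         cols = cols[j + 1:]
--         i += 1
--     return total
-- ===== Notes on version B (the rewrite author's own statement) =====
-- stated objective: alternative
-- what changed: B precomputes the stripped column strings once, then repeatedly locates the next separator column with index('') and aggregates each segment as a slice of whole columns, instead of A's single streaming loop that threads an ops index and a pending-numbers accumulator through every column.
import Mathlib
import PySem

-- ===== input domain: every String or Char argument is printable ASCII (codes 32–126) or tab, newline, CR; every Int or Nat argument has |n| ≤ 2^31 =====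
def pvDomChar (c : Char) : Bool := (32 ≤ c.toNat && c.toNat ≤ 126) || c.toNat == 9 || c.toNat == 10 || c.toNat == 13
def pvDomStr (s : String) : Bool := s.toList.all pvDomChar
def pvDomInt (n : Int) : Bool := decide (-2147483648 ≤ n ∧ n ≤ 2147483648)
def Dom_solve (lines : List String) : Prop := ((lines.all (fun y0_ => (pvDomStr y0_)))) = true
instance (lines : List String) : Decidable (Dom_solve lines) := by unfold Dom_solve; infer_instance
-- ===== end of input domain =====

-- B replaces A's streaming loop (ops index + pending-numbers accumulator per column) by
-- repeated index('')-search and whole-segment slicing over the precomputed stripped columns;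
-- objective: alternative decomposition, same cost.

-- ===== PORT A =====
-- zip(*lines[:-1]) as a list of columns (each column = the tuple of row characters, which
-- "".join turns into exactly that character list). zip truncates to the shortest row; for
-- j below that minimum every getD is in range, so the default ' ' is never read.
def pvCols (lines : List String) : List (List Char) :=
  match (lines.dropLast).map String.toList with
  | [] => []
  | b :: bs =>
    let n := bs.foldl (fun m l => min m l.length) b.length
    (List.range n).map (fun j => (b :: bs).map (fun l => l.getD j ' '))

-- int(val); Pre_solve guarantees ofChars? is some, so the default 0 is never the result.
def pvIntOf (cs : List Char) : Int := (PySem.Int.ofChars? cs).getD 0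

-- ops[i]; Pre_solve guarantees i < ops.length (else Python raises IndexError).
def pvApp (ops : List String) (i : Nat) (nums : List Int) : Int :=
  if ops.getD i "" = "+" then nums.sum else nums.prod

-- A's loop body, state = (i, nums, total)
def pvStepA (ops : List String) (s : Nat × List Int × Int) (col : List Char) :
    Nat × List Int × Int :=
  let val := PySem.Chars.strip col
  if val ≠ [] then (s.1, s.2.1 ++ [pvIntOf val], s.2.2)
  else (s.1 + 1, [], s.2.2 + pvApp ops s.1 s.2.1)

def solve (lines : List String) : Int :=
  let ops := PySem.Str.split₀ ((lines.getLast?).getD "")  -- lines[-1]; Pre_ gives lines ≠ []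
  ((pvCols lines).foldl (pvStepA ops) (0, [], 0)).2.2

-- ===== PORT B =====
-- the while loop of Source B: `"" in cols` + `cols.index("")` together are findIdx? isEmpty
-- (none exactly when "" is not in cols, i.e. the loop stops)
def pvGoB (ops : List String) (i : Nat) (total : Int) (cols : List (List Char)) : Int :=
  match h : cols.findIdx? (fun c => c.isEmpty) with
  | none => total
  | some j =>
    let seg := (cols.take j).map pvIntOf   -- cols[:j]   (j < len(cols), both ends in range)
    pvGoB ops (i + 1) (total + if ops.getD i "" = "+" then seg.sum else seg.prod)
      (cols.drop (j + 1))                  -- cols[j+1:]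
termination_by cols.length
decreasing_by
  have hj := (List.findIdx?_eq_some_iff_findIdx_eq.mp h).1
  simp [List.length_drop]; omega

def solve_alt (lines : List String) : Int :=
  let ops := PySem.Str.split₀ ((lines.getLast?).getD "")
  let cols := (pvCols lines).map PySem.Chars.strip
  pvGoB ops 0 0 cols

-- ===== PRECONDITION & SPEC =====
-- Pre_ excludes exactly the inputs where Python A raises: the empty list (IndexError on
-- lines[-1]), a column whose stripped text is nonempty but not an int literal (ValueError),
-- and more separator columns than operators (IndexError on ops[i]).
def Pre_solve (lines : List String) : Prop :=
  lines ≠ [] ∧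
  (∀ col ∈ pvCols lines,
      PySem.Chars.strip col = [] ∨ (PySem.Int.ofChars? (PySem.Chars.strip col)).isSome = true) ∧
  (pvCols lines).countP (fun col => PySem.Chars.strip col == []) ≤
    (PySem.Str.split₀ ((lines.getLast?).getD "")).length
instance (lines : List String) : Decidable (Pre_solve lines) := by unfold Pre_solve; infer_instance

def pvWitness_solve : List String := ["1 2", "3 4", "+ *"]

def Spec_solve (lines : List String) (out : Int) : Prop := out = solve_alt lines
instance (lines : List String) (out : Int) : Decidable (Spec_solve lines out) := by
  unfold Spec_solve; infer_instance

-- ===== CLAIM (what is proved, stated in full; the proofs are below) =====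
def Claim_equal_solve : Prop :=
  ∀ (lines : List String), Dom_solve lines → Pre_solve lines → Spec_solve lines (solve lines)

-- ===== LEMMAS AND PROOFS =====

theorem pvGoB_step (ops : List String) (i : Nat) (total : Int) (pre rest : List (List Char))
    (h : ∀ v ∈ pre, v ≠ []) :
    pvGoB ops i total (pre ++ [] :: rest) =
      pvGoB ops (i + 1)
        (total + if ops.getD i "" = "+" then (pre.map pvIntOf).sum else (pre.map pvIntOf).prod)
        rest := by
  have hnone : pre.findIdx? (fun c => c.isEmpty) = none :=
    List.findIdx?_eq_none_iff.mpr (fun v hv => by simpa using h v hv)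
  have hfind : (pre ++ [] :: rest).findIdx? (fun c => c.isEmpty) = some pre.length := by
    rw [List.findIdx?_append, hnone, List.findIdx?_cons]
    simp
  have htake : (pre ++ [] :: rest).take pre.length = pre := by
    simp
  have hdrop : (pre ++ [] :: rest).drop (pre.length + 1) = rest := by
    have h1 : pre ++ [] :: rest = (pre ++ [[]]) ++ rest := by simp
    have h2 : pre.length + 1 = (pre ++ [([] : List Char)]).length := by simp
    rw [h1, h2, List.drop_left]
  rw [pvGoB, hfind]
  simp only [htake, hdrop]

theorem pvGoB_nil (ops : List String) (i : Nat) (total : Int) (pre : List (List Char))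
    (h : ∀ v ∈ pre, v ≠ []) : pvGoB ops i total pre = total := by
  have hfind : pre.findIdx? (fun c => c.isEmpty) = none :=
    List.findIdx?_eq_none_iff.mpr (fun v hv => by simpa using h v hv)
  rw [pvGoB, hfind]

-- A's fold, with the pending (necessarily nonempty, already stripped) columns pre pulled
-- out of the state, equals B's segment loop on pre ++ (stripped remaining columns).
theorem pvKey (ops : List String) :
    ∀ (cs pre : List (List Char)) (k : Nat) (total : Int),
      (∀ v ∈ pre, v ≠ []) →
      (cs.foldl (pvStepA ops) (k, pre.map pvIntOf, total)).2.2 =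
        pvGoB ops k total (pre ++ cs.map PySem.Chars.strip) := by
  intro cs
  induction cs with
  | nil =>
    intro pre k total h
    simp [pvGoB_nil ops k total pre h]
  | cons c cs ih =>
    intro pre k total h
    by_cases hv : PySem.Chars.strip c = []
    · have hstep : pvStepA ops (k, pre.map pvIntOf, total) c =
          (k + 1, ([] : List Int), total + pvApp ops k (pre.map pvIntOf)) := by
        simp [pvStepA, hv]
      calc ((c :: cs).foldl (pvStepA ops) (k, pre.map pvIntOf, total)).2.2
          = (cs.foldl (pvStepA ops)
              (k + 1, ([] : List (List Char)).map pvIntOf, total + pvApp ops k (pre.map pvIntOf))).2.2 := by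
            rw [List.foldl_cons, hstep]; rfl
        _ = pvGoB ops (k + 1) (total + pvApp ops k (pre.map pvIntOf))
              ([] ++ cs.map PySem.Chars.strip) := ih [] _ _ (by simp)
        _ = pvGoB ops k total (pre ++ (c :: cs).map PySem.Chars.strip) := by
            rw [List.map_cons, hv, pvGoB_step ops k total pre _ h]
            simp [pvApp]
    · have hstep : pvStepA ops (k, pre.map pvIntOf, total) c =
          (k, (pre ++ [PySem.Chars.strip c]).map pvIntOf, total) := by
        simp [pvStepA, hv]
      have hpre : ∀ v ∈ pre ++ [PySem.Chars.strip c], v ≠ [] := by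
        intro v hvmem
        rcases List.mem_append.mp hvmem with hm | hm
        · exact h v hm
        · simp at hm; simpa [hm] using hv
      calc ((c :: cs).foldl (pvStepA ops) (k, pre.map pvIntOf, total)).2.2
          = (cs.foldl (pvStepA ops)
              (k, (pre ++ [PySem.Chars.strip c]).map pvIntOf, total)).2.2 := by
            rw [List.foldl_cons, hstep]
        _ = pvGoB ops k total ((pre ++ [PySem.Chars.strip c]) ++ cs.map PySem.Chars.strip) :=
            ih _ _ _ hpre
        _ = pvGoB ops k total (pre ++ (c :: cs).map PySem.Chars.strip) := by
            rw [List.append_assoc]; rfl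

theorem solve_eq_alt (lines : List String) : solve lines = solve_alt lines := by
  unfold solve solve_alt
  simpa using pvKey (PySem.Str.split₀ ((lines.getLast?).getD "")) (pvCols lines) [] 0 0
    (by simp)

-- ===== VERDICT (by name: the statement is the Claim_ definition above) =====
theorem solve_spec : Claim_equal_solve := by
  intro lines _ _
  unfold Spec_solve
  exact solve_eq_alt lines
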